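-- pv_equiv track=rewrite | github.com/Greg-Create/code_solutions | fibannici.py | nearestFibonacci
-- ===== SOURCE A (Python) =====
-- def nearestFibonacci(num):
--
--     if (num == 0):
--         return
--
--
--     first = 0
--     second = 1
--
--     third = first + second
--
--
--     while (third <= num):
--
--         first = second
--
--         second = third
--
--         third = first + second
--
--
--     if (abs(third - num) >=
--         abs(second - num)):
--         ans =  second
--     else:
--         ans = third
--
--     return ans
-- ===== SOURCE B (Python) =====
-- def nearestFibonacci(num):
--     if num == 0:
--         return
--     # Fast-doubling Fibonacci: fib_pair(n) = (F(n), F(n+1)) in O(log n) arithmetic ops.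
--     def fib_pair(n):
--         if n == 0:
--             return (0, 1)
--         a, b = fib_pair(n >> 1)
--         c = a * (2 * b - a)
--         d = a * a + b * b
--         return (d, c + d) if n & 1 else (c, d)
--
--     def fib(n):
--         return fib_pair(n)[0]
--
--     # Find the smallest index hi >= 3 with F(hi) > num by exponential
--     # growth followed by binary search (F(2) = 1 is the smallest candidate).
--     hi = 3
--     while fib(hi) <= num:
--         hi *= 2
--     lo = 2
--     while lo + 1 < hi:
--         mid = (lo + hi) // 2
--         if fib(mid) <= num:
--             lo = mid
--         else:
--             hi = mid
--     prev, cur = fib_pair(hi - 1)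
--     return prev if abs(cur - num) >= abs(prev - num) else cur
-- ===== Notes on version B (the rewrite author's own statement) =====
-- stated objective: alternative
-- what changed: Replaces A's sequential generation of every Fibonacci number up to num by computing F(k) directly with the fast-doubling identities and locating the smallest index k with F(k) > num via exponential growth plus binary search, then comparing F(k-1) and F(k).
import Mathlib
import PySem

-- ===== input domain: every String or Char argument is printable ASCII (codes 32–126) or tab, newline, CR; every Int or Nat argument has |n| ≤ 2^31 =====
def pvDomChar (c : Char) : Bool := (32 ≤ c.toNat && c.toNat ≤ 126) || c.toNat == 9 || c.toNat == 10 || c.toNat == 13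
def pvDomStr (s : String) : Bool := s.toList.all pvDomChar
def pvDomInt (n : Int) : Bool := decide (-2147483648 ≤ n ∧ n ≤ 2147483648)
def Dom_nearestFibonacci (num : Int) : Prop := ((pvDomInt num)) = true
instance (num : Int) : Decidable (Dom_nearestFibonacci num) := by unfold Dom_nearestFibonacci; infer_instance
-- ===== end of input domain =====

-- B replaces A's sequential generation of all Fibonacci numbers up to num by fast-doubling
-- computation of F(k) plus exponential-growth-and-binary-search for the crossing index;
-- objective: alternative.

-- ===== PORT A =====
-- A's while loop, as fuel recursion: the fuel (chosen in fibLoopA below) is a totality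
-- guard only — third grows by at least one per iteration (second stays ≥ 1), so A_loop
-- below proves the 0-case is never reached and the recursion is exactly A's while loop.
def fibLoopGoA (num : Int) : Nat → Int → Int → Int → Int × Int
  | 0, _, second, third => (second, third)
  | fuel + 1, _first, second, third =>
    if third ≤ num then fibLoopGoA num fuel second third (second + third)
    else (second, third)

def fibLoopA (num first second third : Int) : Int × Int :=
  fibLoopGoA num (num + 1 - third).toNat first second third

def nearestFibonacci (num : Int) : Option Int :=
  if num = 0 then none
  else
    let first : Int := 0
    let second : Int := 1
    let third := first + second
    let p := fibLoopA num first second third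
    if |p.2 - num| ≥ |p.1 - num| then some p.1 else some p.2

-- ===== PORT B =====
-- B's fast-doubling fib_pair: (F(n), F(n+1)).  Python tests 'n == 0'; the 'n ≤ 0' test and
-- the fuel (chosen in fibPairB below, and proved never exhausted in fibPairGo_eq) are
-- totality guards only: B only ever calls fib_pair with n ≥ 0, where they change nothing.
def fibPairGo : Nat → Int → Int × Int
  | 0, _ => (0, 1)
  | fuel + 1, n =>
    if n ≤ 0 then (0, 1)
    else
      let p := fibPairGo fuel (PySem.Int.floordiv n 2)
      let c := p.1 * (2 * p.2 - p.1)
      let d := p.1 * p.1 + p.2 * p.2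
      if PySem.Int.mod n 2 = 1 then (d, c + d) else (c, d)

def fibPairB (n : Int) : Int × Int := fibPairGo n.toNat n

def fibB (n : Int) : Int := (fibPairB n).1

-- B's doubling loop, as fuel recursion: the fuel (chosen in growB below) is a totality
-- guard only; growGo_spec below proves the fuel is never exhausted, so the 0-case is
-- unreachable and the recursion is exactly Python's 'while fib(hi) <= num: hi *= 2'.
def growGo (num hi : Int) : Nat → Int
  | 0 => hi
  | fuel + 1 => if fibB hi ≤ num then growGo num (hi * 2) fuel else hi

def growB (num hi : Int) : Int := growGo num hi (num + 2 - hi).toNat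

-- B's binary search for the smallest index with fib > num, as fuel recursion: the fuel
-- (chosen in bisectB below) is a totality guard only; the interval shrinks by at least one
-- each step, so bisectB_spec below proves the 0-case is never reached.
def bisectGo (num : Int) : Nat → Int → Int → Int
  | 0, _, hi => hi
  | fuel + 1, lo, hi =>
    if lo + 1 < hi then
      let mid := PySem.Int.floordiv (lo + hi) 2
      if fibB mid ≤ num then bisectGo num fuel mid hi else bisectGo num fuel lo mid
    else hi

def bisectB (num lo hi : Int) : Int := bisectGo num (hi - lo).toNat lo hi

def nearestFibonacci_alt (num : Int) : Option Int :=
  if num = 0 then none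
  else
    let hi := bisectB num 2 (growB num 3)
    let p := fibPairB (hi - 1)
    if |p.2 - num| ≥ |p.1 - num| then some p.1 else some p.2

-- ===== PRECONDITION & SPEC =====
def Spec_nearestFibonacci (num : Int) (out : Option Int) : Prop := out = nearestFibonacci_alt num
instance (num : Int) (out : Option Int) : Decidable (Spec_nearestFibonacci num out) := by unfold Spec_nearestFibonacci; infer_instance

-- ===== CLAIM (what is proved, stated in full; the proofs are below) =====
def Claim_equal_nearestFibonacci : Prop := ∀ (num : Int), Dom_nearestFibonacci num → Spec_nearestFibonacci num (nearestFibonacci num)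

-- ===== LEMMAS AND PROOFS =====

-- pvF i = the i-th Fibonacci number (as an Int), the proofs' reference function
def pvF (i : Int) : Int := (Nat.fib i.toNat : Int)

-- fast-doubling correctness (and: the fuel is never exhausted for fuel ≥ n.toNat)
lemma fibPairGo_eq : ∀ (k : Nat) (n : Int), n.toNat ≤ k → 0 ≤ n →
    fibPairGo k n = (pvF n, pvF (n + 1)) := by
  intro k
  induction k with
  | zero =>
    intro n hk h0
    have : n = 0 := by omega
    subst this
    simp [fibPairGo, pvF]
  | succ k ih =>
    intro n hk h0
    by_cases hn : n ≤ 0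
    · have : n = 0 := by omega
      subst this
      simp [fibPairGo, pvF]
    · rw [fibPairGo, if_neg hn]
      have hm2 : PySem.Int.floordiv n 2 = n / 2 := PySem.Int.floordiv_eq_ediv_of_pos (by omega)
      have hm0 : (0:Int) ≤ n / 2 := by omega
      have ih' := ih (n / 2) (by omega) hm0
      simp only [hm2, ih']
      have hmod : PySem.Int.mod n 2 = n % 2 := PySem.Int.mod_eq_emod_of_pos (by omega)
      rw [hmod]
      set mm := (n / 2).toNat with hmm
      have hfm : Nat.fib mm ≤ 2 * Nat.fib (mm + 1) :=
        le_trans Nat.fib_le_fib_succ (by omega)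
      have hc : (↑(Nat.fib (2 * mm)) : Int)
          = ↑(Nat.fib mm) * (2 * ↑(Nat.fib (mm + 1)) - ↑(Nat.fib mm)) := by
        rw [Nat.fib_two_mul, Nat.cast_mul, Nat.cast_sub hfm]; push_cast; ring
      have hd : (↑(Nat.fib (2 * mm + 1)) : Int)
          = ↑(Nat.fib mm) * ↑(Nat.fib mm) + ↑(Nat.fib (mm + 1)) * ↑(Nat.fib (mm + 1)) := by
        rw [Nat.fib_two_mul_add_one]; push_cast; ring
      have hfib2 : (↑(Nat.fib (2 * mm + 2)) : Int)
          = ↑(Nat.fib (2 * mm)) + ↑(Nat.fib (2 * mm + 1)) := by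
        rw [Nat.fib_add_two]; push_cast; ring
      have hpv : pvF (↑mm) = (Nat.fib mm : Int) := by unfold pvF; simp
      have hpv1 : pvF (↑mm + 1) = (Nat.fib (mm + 1) : Int) := by
        have e : ((mm : Int) + 1).toNat = mm + 1 := by omega
        unfold pvF; rw [e]
      have hnd2 : (n / 2 : Int) = (mm : Int) := by omega
      rw [hnd2, hpv, hpv1]
      by_cases hp : n % 2 = 1
      · have hne : n.toNat = 2 * mm + 1 := by omega
        rw [if_pos hp]
        unfold pvF
        have e1 : (n + 1).toNat = 2 * mm + 2 := by omega
        rw [hne, e1]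
        simp only [Prod.mk.injEq]
        constructor
        · rw [hd]
        · rw [hfib2, hc, hd]
      · have hp0 : n % 2 = 0 := by omega
        have hne : n.toNat = 2 * mm := by omega
        rw [if_neg hp]
        unfold pvF
        have e1 : (n + 1).toNat = 2 * mm + 1 := by omega
        rw [hne, e1]
        simp only [Prod.mk.injEq]
        exact ⟨hc.symm, hd.symm⟩

lemma fibPairB_eq (n : Int) (h : 0 ≤ n) : fibPairB n = (pvF n, pvF (n + 1)) :=
  fibPairGo_eq n.toNat n le_rfl h

lemma fibB_eq (n : Int) (h : 0 ≤ n) : fibB n = pvF n := by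
  unfold fibB; rw [fibPairB_eq n h]

lemma pvF_mono {i j : Int} (h : i ≤ j) : pvF i ≤ pvF j := by
  unfold pvF; exact_mod_cast Nat.fib_mono (by omega)

lemma pvF_one : pvF 1 = 1 := by decide
lemma pvF_two : pvF 2 = 1 := by decide
lemma pvF_three : pvF 3 = 2 := by decide

lemma pvF_add_two (j : Int) (h : 0 ≤ j) : pvF (j + 2) = pvF j + pvF (j + 1) := by
  unfold pvF
  have e2 : (j + 2).toNat = j.toNat + 2 := by omega
  have e1 : (j + 1).toNat = j.toNat + 1 := by omega
  rw [e2, e1, Nat.fib_add_two]; push_cast; ring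

lemma pvF_pos {j : Int} (h : 1 ≤ j) : 1 ≤ pvF j := by
  have := pvF_mono (show (1:Int) ≤ j from h)
  rw [pvF_one] at this; omega

-- the crossing index is unique: two indices ≥ 3 with fib(k) > num ≥ fib(k-1) coincide
lemma k_unique (num k1 k2 : Int) (h1 : 3 ≤ k1) (h2 : 3 ≤ k2)
    (a1 : num < pvF k1) (b1 : pvF (k1 - 1) ≤ num)
    (a2 : num < pvF k2) (b2 : pvF (k2 - 1) ≤ num) : k1 = k2 := by
  rcases lt_trichotomy k1 k2 with h | h | h
  · have := pvF_mono (show k1 ≤ k2 - 1 by omega); omega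
  · exact h
  · have := pvF_mono (show k2 ≤ k1 - 1 by omega); omega

-- A's loop reaches the crossing index (and its fuel is never exhausted)
lemma A_loop (num : Int) :
    ∀ (n : Nat) (j a : Int), 1 ≤ j → pvF j ≤ num → (num + 1 - pvF (j + 1)).toNat ≤ n →
    ∃ k : Int, 3 ≤ k ∧ fibLoopGoA num n a (pvF j) (pvF (j + 1)) = (pvF (k - 1), pvF k) ∧
      num < pvF k ∧ pvF (k - 1) ≤ num := by
  intro n
  induction n with
  | zero =>
    intro j a hj hjn hm
    have hpj := pvF_pos hj
    refine ⟨j + 1, ?_, by rw [show j + 1 - 1 = j from by ring]; rfl, by omega, by simpa using hjn⟩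
    by_contra hk
    have := pvF_mono (show j + 1 ≤ 2 by omega)
    rw [pvF_two] at this; omega
  | succ n ih =>
    intro j a hj hjn hm
    have hpj := pvF_pos hj
    by_cases hc : pvF (j + 1) ≤ num
    · rw [fibLoopGoA, if_pos hc]
      have hstep : pvF j + pvF (j + 1) = pvF (j + 1 + 1) := by
        have := pvF_add_two j (by omega)
        have e : j + 2 = j + 1 + 1 := by ring
        rw [e] at this; omega
      rw [hstep]
      have hpj1 := pvF_pos (show (1:Int) ≤ j + 1 by omega)
      refine ih (j + 1) (pvF j) (by omega) hc ?_
      have : pvF (j + 1 + 1) = pvF j + pvF (j + 1) := hstep.symm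
      omega
    · rw [fibLoopGoA, if_neg hc]
      refine ⟨j + 1, ?_, by rw [show j + 1 - 1 = j from by ring], by omega, by simpa using hjn⟩
      by_contra hk
      have := pvF_mono (show j + 1 ≤ 2 by omega)
      rw [pvF_two] at this; omega

-- every Fibonacci number is at least its index minus one
lemma fib_ge : ∀ (n : Nat), n ≤ Nat.fib n + 1 := by
  intro n
  induction n using Nat.strong_induction_on with
  | _ n ih =>
    match n with
    | 0 => simp
    | 1 => simp
    | n + 2 =>
      have h1 := ih n (by omega)
      have h2 := ih (n + 1) (by omega)
      have hp : 1 ≤ Nat.fib (n + 1) := Nat.fib_pos.mpr (by omega)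
      have hr : n = 0 ∨ 1 ≤ Nat.fib n := by
        rcases Nat.eq_zero_or_pos n with h | h
        · exact Or.inl h
        · exact Or.inr (Nat.fib_pos.mpr h)
      rw [Nat.fib_add_two]
      omega

lemma pvF_ge (i : Int) (h : 0 ≤ i) : i - 1 ≤ pvF i := by
  unfold pvF
  have := fib_ge i.toNat
  omega

-- B's doubling phase reaches an upper bound (and its fuel is never exhausted)
lemma growGo_spec (num : Int) :
    ∀ (fuel : Nat) (hi : Int), 3 ≤ hi → (num + 2 - hi).toNat ≤ fuel →
    3 ≤ growGo num hi fuel ∧ num < fibB (growGo num hi fuel) := by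
  intro fuel
  induction fuel with
  | zero =>
    intro hi h3 hm
    have hge := pvF_ge hi (by omega)
    have he : fibB hi = pvF hi := fibB_eq hi (by omega)
    exact ⟨h3, by unfold growGo; omega⟩
  | succ fuel ih =>
    intro hi h3 hm
    unfold growGo
    by_cases hc : fibB hi ≤ num
    · rw [if_pos hc]
      have hge := pvF_ge hi (by omega)
      have he : fibB hi = pvF hi := fibB_eq hi (by omega)
      exact ih (hi * 2) (by omega) (by omega)
    · rw [if_neg hc]
      exact ⟨h3, by omega⟩

lemma growB_spec (num : Int) : 3 ≤ growB num 3 ∧ num < fibB (growB num 3) :=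
  growGo_spec num (num + 2 - 3).toNat 3 (by omega) le_rfl

-- B's binary search pins the crossing index (and its fuel is never exhausted)
lemma bisectGo_spec (num : Int) :
    ∀ (fuel : Nat) (lo hi : Int), (hi - lo).toNat ≤ fuel → 2 ≤ lo → lo < hi →
    fibB lo ≤ num → num < fibB hi →
    3 ≤ bisectGo num fuel lo hi ∧ num < fibB (bisectGo num fuel lo hi) ∧
      fibB (bisectGo num fuel lo hi - 1) ≤ num := by
  intro fuel
  induction fuel with
  | zero => intro lo hi hm; omega
  | succ fuel ih =>
    intro lo hi hm hlo hlt hfl hfh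
    by_cases hg : lo + 1 < hi
    · have hmid : PySem.Int.floordiv (lo + hi) 2 = (lo + hi) / 2 :=
        PySem.Int.floordiv_eq_ediv_of_pos (by omega)
      rw [bisectGo, if_pos hg]
      simp only [hmid]
      have hb1 : lo < (lo + hi) / 2 := by omega
      have hb2 : (lo + hi) / 2 < hi := by omega
      by_cases hc : fibB ((lo + hi) / 2) ≤ num
      · rw [if_pos hc]
        exact ih ((lo + hi) / 2) hi (by omega) (by omega) hb2 hc hfh
      · rw [if_neg hc]
        exact ih lo ((lo + hi) / 2) (by omega) hlo hb1 hfl (by omega)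
    · rw [bisectGo, if_neg hg]
      have he : hi = lo + 1 := by omega
      refine ⟨by omega, hfh, ?_⟩
      rw [he]; simpa using hfl

lemma bisectB_spec (num lo hi : Int) (hlo : 2 ≤ lo) (hlt : lo < hi)
    (hfl : fibB lo ≤ num) (hfh : num < fibB hi) :
    3 ≤ bisectB num lo hi ∧ num < fibB (bisectB num lo hi) ∧
      fibB (bisectB num lo hi - 1) ≤ num :=
  bisectGo_spec num (hi - lo).toNat lo hi le_rfl hlo hlt hfl hfh

-- ===== VERDICT (by name: the statement is the Claim_ definition above) =====
theorem nearestFibonacci_spec : Claim_equal_nearestFibonacci := by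
  intro num _
  unfold Spec_nearestFibonacci nearestFibonacci nearestFibonacci_alt
  by_cases h0 : num = 0
  · simp [h0]
  · simp only [h0, if_false]
    by_cases h1 : 1 ≤ num
    · -- A's loop and B's search both land on the unique crossing index
      obtain ⟨kA, hkA3, hApair, hAgt, hAle⟩ :=
        A_loop num (num + 1 - pvF 2).toNat 1 0 le_rfl (by rw [pvF_one]; omega)
          (by norm_num)
      rw [show (1:Int) + 1 = 2 from by norm_num] at hApair
      obtain ⟨hg3, hggt⟩ := growB_spec num
      have hf2 : fibB 2 = 1 := by rw [fibB_eq 2 (by omega), pvF_two]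
      obtain ⟨hb3, hbgt, hble⟩ :=
        bisectB_spec num 2 (growB num 3) le_rfl (by omega) (by omega) hggt
      set kB := bisectB num 2 (growB num 3) with hkB
      have hBgt : num < pvF kB := by rw [← fibB_eq kB (by omega)]; exact hbgt
      have hBle : pvF (kB - 1) ≤ num := by rw [← fibB_eq (kB - 1) (by omega)]; exact hble
      have hk : kA = kB := k_unique num kA kB hkA3 hb3 hAgt hAle hBgt hBle
      have hpairB : fibPairB (kB - 1) = (pvF (kB - 1), pvF kB) := by
        rw [fibPairB_eq (kB - 1) (by omega),
          show kB - 1 + 1 = kB from by ring]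
      have e21 : pvF 1 = (1:Int) := pvF_one
      have e22 : pvF 2 = (1:Int) := pvF_two
      have estart : fibLoopA num 0 1 (0 + 1)
          = fibLoopGoA num (num + 1 - pvF 2).toNat 0 (pvF 1) (pvF 2) := by
        unfold fibLoopA; rw [e21, e22]; norm_num
      simp only [estart, hApair, hpairB, hk]
    · -- num < 0: A's loop exits immediately; B finds index 3; both answer 1
      have hneg : num < 0 := by omega
      have hf3 : fibB 3 = 2 := by rw [fibB_eq 3 (by omega), pvF_three]
      have hgrow : growB num 3 = 3 := by
        unfold growB
        rw [show (num + 2 - 3).toNat = 0 from by omega]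
        rfl
      have hbis : bisectB num 2 3 = 3 := by
        unfold bisectB
        rw [show ((3:Int) - 2).toNat = 1 from rfl, bisectGo, if_neg (by omega)]
      have hpair2 : fibPairB 2 = (1, 2) := by
        rw [fibPairB_eq 2 (by omega), pvF_two,
          show (2:Int) + 1 = 3 from by norm_num, pvF_three]
      have hA : fibLoopA num 0 1 (0 + 1) = (1, 0 + 1) := by
        unfold fibLoopA
        rw [show (num + 1 - (0 + 1)).toNat = 0 from by omega]
        rfl
      rw [hA, hgrow, hbis,
        show (3:Int) - 1 = 2 from by norm_num, hpair2]
      simp only [show (0:Int) + 1 = 1 from by norm_num]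
      have e1 : |(1:Int) - num| = 1 - num := abs_of_nonneg (by omega)
      have e2 : |(2:Int) - num| = 2 - num := abs_of_nonneg (by omega)
      rw [if_pos (le_refl |(1:Int) - num|), if_pos (show |(2:Int) - num| ≥ |(1:Int) - num| by rw [e1, e2]; omega)]
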